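-- pv_equiv track=rewrite | github.com/AV3S-NTF/Logia | etap2/Ex3_LOGIA03.py | kod
-- ===== SOURCE A (Python) =====
-- def checkLonelySound(letter):
--     return (letter == 'a' or letter == 'e' or letter == 'y' or letter == 'i' or letter == 'o' or letter == 'u')
--
-- def kod(s):
--     encoded = ""
--
--     length = len(s)
--
--     wasTogetherSound = False
--     wasTogether = 0
--
--     buffer = ''
--
--     encoded += s[0]
--
--     if (not checkLonelySound(s[0])):
--         wasTogetherSound = True
--
--     for i in range(1, length - 1):
--         if (checkLonelySound(s[i])):
--             if (wasTogetherSound and wasTogether >= 2):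
--                 encoded += buffer
--             encoded += s[i]
--             encoded += s[i]
--             wasTogetherSound = False
--             wasTogether = 0
--         elif (not wasTogetherSound):
--             wasTogetherSound = True
--             wasTogether += 1
--             encoded += s[i]
--         else:
--             wasTogether += 1
--         buffer = s[i]
--
--     if (checkLonelySound(s[length - 1]) and not checkLonelySound(s[length - 2])):
--         encoded += s[length - 2]
--
--     encoded += s[length - 1]
--
--     return encoded
-- ===== SOURCE B (Python) =====
-- VOWELS = frozenset('aeyiou')
--
-- def kod(s):
--     n = len(s)
--     out = [s[0]]
--     # segment the middle region s[1:n-1] into maximal vowel/consonant runs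
--     runs = []
--     for ch in s[1:n - 1]:
--         is_vowel = ch in VOWELS
--         if runs and runs[-1][0] == is_vowel:
--             runs[-1][1].append(ch)
--         else:
--             runs.append((is_vowel, [ch]))
--     prev_is_vowel = s[0] in VOWELS
--     cons_len = 0
--     cons_last = ''
--     for is_vowel, chars in runs:
--         if is_vowel:
--             if cons_len >= 2:
--                 out.append(cons_last)
--             for c in chars:
--                 out.append(c)
--                 out.append(c)
--             cons_len = 0
--         else:
--             if prev_is_vowel:
--                 out.append(chars[0])
--             cons_len = len(chars)
--             cons_last = chars[-1]
--         prev_is_vowel = is_vowel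
--     # tail rule: a final vowel pulls in a preceding consonant
--     if s[n - 1] in VOWELS and s[n - 2] not in VOWELS:
--         out.append(s[n - 2])
--     out.append(s[n - 1])
--     return ''.join(out)
-- ===== Notes on version B (the rewrite author's own statement) =====
-- stated objective: alternative
-- what changed: B first segments the middle of the string into maximal vowel/consonant runs and then emits output per run (raw first char, doubled vowels with a prepended last consonant of a preceding run of length >= 2, first consonant of a run only after a vowel, then A's exact tail rule), replacing A's single char-by-char flag/counter state machine.
-- outside the precondition, e.g. on kod(''): A raises IndexError, B raises IndexError
import Mathlib
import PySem

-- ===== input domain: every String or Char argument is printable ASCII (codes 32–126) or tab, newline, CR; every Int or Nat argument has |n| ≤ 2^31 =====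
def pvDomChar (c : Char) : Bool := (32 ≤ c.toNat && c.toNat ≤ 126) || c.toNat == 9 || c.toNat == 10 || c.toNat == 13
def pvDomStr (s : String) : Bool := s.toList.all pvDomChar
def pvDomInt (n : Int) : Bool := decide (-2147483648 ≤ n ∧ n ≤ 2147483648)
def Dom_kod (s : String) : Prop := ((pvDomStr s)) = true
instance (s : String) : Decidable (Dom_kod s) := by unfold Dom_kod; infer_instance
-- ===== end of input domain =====

-- B re-implements kod by first segmenting the middle of the string into maximal
-- vowel/consonant runs and then emitting per run (objective: alternative decomposition,
-- same cost); equivalence with A's single char-by-char state-machine pass is proved below.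

-- ===== PORT A =====
def checkLonelySound (letter : Char) : Bool :=
  letter == 'a' || letter == 'e' || letter == 'y' || letter == 'i' || letter == 'o' || letter == 'u'

-- the body of A's `for i in range(1, length - 1)` loop; state = (encoded, wasTogetherSound, wasTogether, buffer)
def kodStep (cs : List Char) (st : List Char × Bool × Int × List Char) (i : Int) :
    List Char × Bool × Int × List Char :=
  let si := PySem.List.pyGetD cs i ' '   -- s[i]; every i produced by the range is in bounds
  if checkLonelySound si then
    ((if st.2.1 ∧ st.2.2.1 ≥ 2 then st.1 ++ st.2.2.2 else st.1) ++ [si, si], false, 0, [si])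
  else if !st.2.1 then
    (st.1 ++ [si], true, st.2.2.1 + 1, [si])
  else
    (st.1, st.2.1, st.2.2.1 + 1, [si])

def kod (s : String) : String :=
  match s.toList with
  | [] => ""   -- `s[0]` raises IndexError on the empty string (excluded by Pre_kod)
  | c0 :: rest =>
    let cs := c0 :: rest
    let length : Int := cs.length
    let st := (PySem.List.pyRange 1 (length - 1) 1).foldl (kodStep cs)
        ([c0], !checkLonelySound c0, (0 : Int), ([] : List Char))
    let prev := PySem.List.pyGetD cs (length - 2) ' '   -- s[length-2]; index -1 wraps when length = 1
    let last := PySem.List.pyGetD cs (length - 1) ' '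
    String.ofList ((if checkLonelySound last ∧ ¬ checkLonelySound prev then st.1 ++ [prev] else st.1) ++ [last])

-- ===== PORT B =====
def pvVOWELS : List Char := ['a', 'e', 'y', 'i', 'o', 'u']

def pvIsVowel (c : Char) : Bool := pvVOWELS.contains c

-- Source B's run-building loop body: extend the last run or start a new one
def pvPush (runs : List (Bool × List Char)) (c : Char) : List (Bool × List Char) :=
  match runs.getLast? with
  | some (t, xs) =>
    if t == pvIsVowel c then runs.dropLast ++ [(t, xs ++ [c])] else runs ++ [(pvIsVowel c, [c])]
  | none => [(pvIsVowel c, [c])]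

-- Source B's per-run emission loop body; state = (out, prev_is_vowel, cons_len, cons_last)
def pvRunStep (st : List Char × Bool × Int × List Char) (run : Bool × List Char) :
    List Char × Bool × Int × List Char :=
  if run.1 then
    (run.2.foldl (fun o c => o ++ [c, c]) (if st.2.2.1 ≥ 2 then st.1 ++ st.2.2.2 else st.1),
      run.1, 0, st.2.2.2)
  else
    ((if st.2.1 then st.1 ++ [run.2.headD ' '] else st.1), run.1, (run.2.length : Int),
      [run.2.getLastD ' '])   -- runs built by pvPush are never empty, so the defaults are unused

def kod_alt (s : String) : String :=
  match s.toList with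
  | [] => ""   -- Source B's `s[0]` raises IndexError on the empty string (excluded by Pre_kod)
  | c0 :: rest =>
    let cs := c0 :: rest
    let n : Int := cs.length
    let runs := (PySem.List.slice cs (some 1) (some (n - 1))).foldl pvPush []
    let st := runs.foldl pvRunStep ([c0], pvIsVowel c0, (0 : Int), ([] : List Char))
    let prev := PySem.List.pyGetD cs (n - 2) ' '
    let last := PySem.List.pyGetD cs (n - 1) ' '
    String.ofList ((if pvIsVowel last ∧ ¬ pvIsVowel prev then st.1 ++ [prev] else st.1) ++ [last])

-- ===== PRECONDITION & SPEC =====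
-- Pre_kod excludes only the empty string, on which A (and B) raise IndexError at s[0].
def Pre_kod (s : String) : Prop := s.toList ≠ []
instance (s : String) : Decidable (Pre_kod s) := by unfold Pre_kod; infer_instance

def pvWitness_kod : String := "przyklad"

def Spec_kod (s : String) (out : String) : Prop := out = kod_alt s
instance (s : String) (out : String) : Decidable (Spec_kod s out) := by unfold Spec_kod; infer_instance

-- ===== CLAIM (what is proved, stated in full; the proofs are below) =====
def Claim_equal_kod : Prop := ∀ (s : String), Dom_kod s → Pre_kod s → Spec_kod s (kod s)

-- ===== LEMMAS AND PROOFS =====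
-- canonical run decomposition of a char list (proof-side helper)
def pvRunsOf : List Char → List (Bool × List Char)
  | [] => []
  | c :: cs =>
    (pvIsVowel c, c :: cs.takeWhile (fun d => pvIsVowel d == pvIsVowel c)) ::
      pvRunsOf (cs.dropWhile (fun d => pvIsVowel d == pvIsVowel c))
termination_by l => l.length
decreasing_by
  exact Nat.lt_succ_of_le (List.length_dropWhile_le ..)

-- pvConsRuns t xs cs : the runs of (xs ++ cs) given that xs is the (typed-t) open run so far
def pvConsRuns (t : Bool) (xs : List Char) : List Char → List (Bool × List Char)
  | [] => [(t, xs)]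
  | c :: cs =>
    if pvIsVowel c == t then pvConsRuns t (xs ++ [c]) cs
    else (t, xs) :: pvConsRuns (pvIsVowel c) [c] cs

theorem pvIsVowel_eq (c : Char) : pvIsVowel c = checkLonelySound c := by
  simp only [pvIsVowel, pvVOWELS, checkLonelySound, List.contains_cons, List.contains_nil,
    Bool.or_false, Bool.or_assoc]

theorem foldl_pvPush (cs : List Char) : ∀ (rs : List (Bool × List Char)) (t : Bool) (xs : List Char),
    cs.foldl pvPush (rs ++ [(t, xs)]) = rs ++ pvConsRuns t xs cs := by
  induction cs with
  | nil => intro rs t xs; simp [pvConsRuns]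
  | cons c cs ih =>
    intro rs t xs
    simp only [List.foldl_cons, pvPush, List.getLast?_concat, List.dropLast_concat, pvConsRuns]
    by_cases h : pvIsVowel c = t
    · simp [h, ih]
    · have h' : (t == pvIsVowel c) = false := by
        cases t <;> cases hc : pvIsVowel c <;> simp_all
      rw [h', if_neg (by simp), if_neg (by simp [h])]
      have := ih (rs ++ [(t, xs)]) (pvIsVowel c) [c]
      simpa using this

theorem pvConsRuns_eq (cs : List Char) : ∀ (t : Bool) (xs : List Char),
    pvConsRuns t xs cs =
      (t, xs ++ cs.takeWhile (fun d => pvIsVowel d == t)) ::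
        pvRunsOf (cs.dropWhile (fun d => pvIsVowel d == t)) := by
  induction cs with
  | nil => intro t xs; simp [pvConsRuns, pvRunsOf]
  | cons c cs ih =>
    intro t xs
    by_cases h : pvIsVowel c = t
    · subst h
      simp only [pvConsRuns, beq_self_eq_true, List.takeWhile_cons, List.dropWhile_cons]
      rw [ih]
      simp
    · have h' : (pvIsVowel c == t) = false := by simp [h]
      simp only [pvConsRuns, h', List.takeWhile_cons, List.dropWhile_cons,
        Bool.false_eq_true, if_false, List.append_nil]
      rw [ih, pvRunsOf]
      simp

theorem buildRuns_eq (cs : List Char) : cs.foldl pvPush [] = pvRunsOf cs := by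
  cases cs with
  | nil => simp [pvRunsOf]
  | cons c cs =>
    have h0 : pvPush [] c = [] ++ [(pvIsVowel c, [c])] := by simp [pvPush]
    rw [List.foldl_cons, h0, foldl_pvPush, pvConsRuns_eq, pvRunsOf]
    simp

-- A's loop body as a function of the character itself (kodStep after index resolution)
def pvStepA (st : List Char × Bool × Int × List Char) (c : Char) :
    List Char × Bool × Int × List Char :=
  if checkLonelySound c then
    ((if st.2.1 ∧ st.2.2.1 ≥ 2 then st.1 ++ st.2.2.2 else st.1) ++ [c, c], false, 0, [c])
  else if !st.2.1 then
    (st.1 ++ [c], true, st.2.2.1 + 1, [c])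
  else
    (st.1, st.2.1, st.2.2.1 + 1, [c])

theorem foldl_last (l : List Char) : ∀ (b : List Char),
    l.foldl (fun _ d => [d]) b = (match l.getLast? with | none => b | some d => [d]) := by
  induction l with
  | nil => intro b; rfl
  | cons c l ih =>
    intro b
    rw [List.foldl_cons, ih]
    cases h : l.getLast? with
    | none => simp [List.getLast?_eq_none_iff.1 h]
    | some d => simp [List.getLast?_cons, h]

-- A's loop across a block of consonants with the flag already set: nothing is emitted
theorem stepA_cons_run (run : List Char) : ∀ (rest acc : List Char) (k : Int) (b : List Char),
    (∀ d ∈ run, checkLonelySound d = false) →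
    (run ++ rest).foldl pvStepA (acc, true, k, b) =
      rest.foldl pvStepA (acc, true, k + run.length, run.foldl (fun _ d => [d]) b) := by
  induction run with
  | nil => intro rest acc k b _; simp
  | cons d run ih =>
    intro rest acc k b hall
    have hd : checkLonelySound d = false := hall d (by simp)
    have h1 : pvStepA (acc, true, k, b) d = (acc, true, k + 1, [d]) := by
      simp [pvStepA, hd]
    rw [List.cons_append, List.foldl_cons, h1, ih rest acc (k + 1) [d]
      (fun x hx => hall x (by simp [hx]))]
    simp only [List.foldl_cons, List.length_cons]
    rw [show k + 1 + (run.length : Int) = k + ((run.length + 1 : Nat) : Int) by push_cast; ring]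

-- A's loop across a block of vowels starting right after a vowel: each vowel is doubled
theorem stepA_vowel_run (run : List Char) : ∀ (rest acc : List Char) (b : List Char),
    (∀ d ∈ run, checkLonelySound d = true) →
    (run ++ rest).foldl pvStepA (acc, false, 0, b) =
      rest.foldl pvStepA (acc ++ run.flatMap (fun d => [d, d]), false, 0,
        run.foldl (fun _ d => [d]) b) := by
  induction run with
  | nil => intro rest acc b _; simp
  | cons d run ih =>
    intro rest acc b hall
    have hd : checkLonelySound d = true := hall d (by simp)
    have h1 : pvStepA (acc, false, 0, b) d = (acc ++ [d, d], false, 0, [d]) := by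
      simp [pvStepA, hd]
    rw [List.cons_append, List.foldl_cons, h1, ih rest (acc ++ [d, d]) [d]
      (fun x hx => hall x (by simp [hx]))]
    simp

theorem pvBufLast (c : Char) (l : List Char) :
    l.foldl (fun _ d => [d]) [c] = [(c :: l).getLastD ' '] := by
  rw [foldl_last]
  cases h : l.getLast? with
  | none => simp [List.getLast?_eq_none_iff.1 h]
  | some d => simp [List.getLastD_eq_getLast?, List.getLast?_cons, h]

-- the main simulation: A's char-by-char pass equals B's run-by-run pass
theorem pvMain (mid : List Char) : ∀ (acc : List Char) (pv : Bool) (k cl : Int) (b cls : List Char),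
    k = cl → (cl ≥ 2 → b = cls) → (pv = true → cl = 0) →
    (∀ c, mid.head? = some c → pvIsVowel c = false → k = 0) →
    (mid.foldl pvStepA (acc, !pv, k, b)).1 =
      ((pvRunsOf mid).foldl pvRunStep (acc, pv, cl, cls)).1 := by
  induction mid using pvRunsOf.induct with
  | case1 => intro acc pv k cl b cls h1 h2 h3 h4; simp [pvRunsOf]
  | case2 c cs ih =>
    intro acc pv k cl b cls h1 h2 h3 h4
    have hsplit : c :: cs = (c :: cs.takeWhile (fun d => pvIsVowel d == pvIsVowel c))
        ++ cs.dropWhile (fun d => pvIsVowel d == pvIsVowel c) := by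
      rw [List.cons_append, List.takeWhile_append_dropWhile]
    have htake : ∀ d ∈ cs.takeWhile (fun d => pvIsVowel d == pvIsVowel c),
        pvIsVowel d = pvIsVowel c := by
      intro d hd
      have := List.mem_takeWhile_imp hd
      simpa using this
    have hdropv : ∀ d, (cs.dropWhile (fun d => pvIsVowel d == pvIsVowel c)).head? = some d →
        pvIsVowel d ≠ pvIsVowel c := by
      intro d hd
      have hne : cs.dropWhile (fun d => pvIsVowel d == pvIsVowel c) ≠ [] := by
        intro hnil; rw [hnil] at hd; simp at hd
      have hhd := List.head_dropWhile_not (fun d => pvIsVowel d == pvIsVowel c) hne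
      rw [List.head?_eq_some_head hne] at hd
      injection hd with hd
      rw [hd] at hhd
      simpa using hhd
    conv_lhs => rw [hsplit]
    rw [pvRunsOf]
    conv_rhs => rw [List.foldl_cons]
    by_cases hv : pvIsVowel c = true
    · -- vowel run
      have hcv : checkLonelySound c = true := by rw [← pvIsVowel_eq]; exact hv
      have htkv : ∀ d ∈ c :: cs.takeWhile (fun d => pvIsVowel d == pvIsVowel c),
          checkLonelySound d = true := by
        intro d hd
        rcases List.mem_cons.1 hd with h | h
        · rw [h]; exact hcv
        · rw [← pvIsVowel_eq, htake d h]; exact hv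
      have hB : pvRunStep (acc, pv, cl, cls)
            (pvIsVowel c, c :: cs.takeWhile (fun d => pvIsVowel d == pvIsVowel c)) =
          ((if cl ≥ 2 then acc ++ cls else acc)
              ++ (c :: cs.takeWhile (fun d => pvIsVowel d == pvIsVowel c)).flatMap
                  (fun d => [d, d]), true, 0, cls) := by
        simp [pvRunStep, hv, List.flatMap_def]
      rw [hB]
      by_cases hpv : pv = true
      · subst hpv
        have hcl : cl = 0 := h3 rfl
        have hk : k = 0 := by omega
        subst hcl; subst hk
        rw [show (!true) = false from rfl,
          stepA_vowel_run _ _ acc b htkv]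
        rw [if_neg (by omega)]
        exact ih _ true 0 0 _ cls rfl (by omega) (fun _ => rfl) (fun c' _ _ => rfl)
      · have hpv' : pv = false := by revert hpv; cases pv <;> simp
        subst hpv'
        have hA1 : pvStepA (acc, !false, k, b) c =
            ((if k ≥ 2 then acc ++ b else acc) ++ [c, c], false, 0, [c]) := by
          simp [pvStepA, hcv]
        rw [List.cons_append, List.foldl_cons, hA1,
          stepA_vowel_run _ _ _ [c] (fun d hd => htkv d (List.mem_cons_of_mem c hd))]
        have hout : (if k ≥ 2 then acc ++ b else acc) ++ [c, c]
              ++ (cs.takeWhile (fun d => pvIsVowel d == pvIsVowel c)).flatMap (fun d => [d, d])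
            = (if cl ≥ 2 then acc ++ cls else acc)
              ++ (c :: cs.takeWhile (fun d => pvIsVowel d == pvIsVowel c)).flatMap
                  (fun d => [d, d]) := by
          subst h1
          by_cases hk2 : k ≥ 2
          · rw [if_pos hk2, if_pos hk2, h2 hk2]
            simp
          · rw [if_neg hk2, if_neg hk2]
            simp
        rw [hout]
        exact ih _ true 0 0 _ cls rfl (by omega) (fun _ => rfl) (fun c' _ _ => rfl)
    · -- consonant run
      have hvf : pvIsVowel c = false := by revert hv; cases pvIsVowel c <;> simp
      have hcv : checkLonelySound c = false := by rw [← pvIsVowel_eq]; exact hvf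
      have htkc : ∀ d ∈ cs.takeWhile (fun d => pvIsVowel d == pvIsVowel c),
          checkLonelySound d = false := by
        intro d hd
        rw [← pvIsVowel_eq, htake d hd]; exact hvf
      have hB : pvRunStep (acc, pv, cl, cls)
            (pvIsVowel c, c :: cs.takeWhile (fun d => pvIsVowel d == pvIsVowel c)) =
          ((if pv then acc ++ [c] else acc), false,
            (((c :: cs.takeWhile (fun d => pvIsVowel d == pvIsVowel c)).length : Nat) : Int),
            [(c :: cs.takeWhile (fun d => pvIsVowel d == pvIsVowel c)).getLastD ' ']) := by
        simp [pvRunStep, hvf]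
      rw [hB]
      have h4' : ∀ c', (cs.dropWhile (fun d => pvIsVowel d == pvIsVowel c)).head? = some c' →
          pvIsVowel c' = false →
          (((c :: cs.takeWhile (fun d => pvIsVowel d == pvIsVowel c)).length : Nat) : Int) = 0 := by
        intro c' hc' hvc'
        exact absurd (hvc'.trans hvf.symm) (hdropv c' hc')
      by_cases hpv : pv = true
      · subst hpv
        have hcl : cl = 0 := h3 rfl
        have hk : k = 0 := by omega
        subst hcl; subst hk
        have hA1 : pvStepA (acc, !true, 0, b) c = (acc ++ [c], true, 0 + 1, [c]) := by
          simp [pvStepA, hcv]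
        rw [List.cons_append, List.foldl_cons, hA1,
          stepA_cons_run _ _ _ (0 + 1) [c] htkc, pvBufLast]
        rw [show (0 : Int) + 1 + ((cs.takeWhile (fun d => pvIsVowel d == pvIsVowel c)).length : Int)
            = (((c :: cs.takeWhile (fun d => pvIsVowel d == pvIsVowel c)).length : Nat) : Int) by
          push_cast [List.length_cons]; ring]
        rw [if_pos rfl]
        exact ih _ false _ _ _ _ rfl (fun _ => rfl) (fun hf => by simp at hf) h4'
      · have hpv' : pv = false := by revert hpv; cases pv <;> simp
        subst hpv'
        have hk : k = 0 := h4 c rfl hvf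
        subst hk
        rw [show (!false) = true from rfl,
          stepA_cons_run _ _ acc 0 b (fun d hd => by
            rcases List.mem_cons.1 hd with h | h
            · rw [h]; exact hcv
            · exact htkc d h)]
        rw [List.foldl_cons, pvBufLast]
        rw [show (0 : Int) + ((c :: cs.takeWhile (fun d => pvIsVowel d == pvIsVowel c)).length : Int)
            = (((c :: cs.takeWhile (fun d => pvIsVowel d == pvIsVowel c)).length : Nat) : Int) by ring]
        rw [if_neg (by simp)]
        exact ih _ false _ _ _ _ rfl (fun _ => rfl) (fun hf => by simp at hf) h4'


-- A's index loop over range(1, length-1) is a fold over the middle characters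
theorem kodA_fold (c0 : Char) (rest : List Char) (st0 : List Char × Bool × Int × List Char) :
    (PySem.List.pyRange 1 (((c0 :: rest).length : Int) - 1) 1).foldl (kodStep (c0 :: rest)) st0
      = rest.dropLast.foldl pvStepA st0 := by
  have hxslen : ((c0 :: rest).take rest.length).length = rest.length := by
    simp [List.length_take]
  have hb : (((c0 :: rest).length : Int) - 1) = (((c0 :: rest).take rest.length).length : Int) := by
    rw [hxslen]; push_cast [List.length_cons]; ring
  rw [hb]
  have hcongr : (PySem.List.pyRange 1 ((((c0 :: rest).take rest.length).length : Nat) : Int) 1).foldl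
        (kodStep (c0 :: rest)) st0
      = (PySem.List.pyRange 1 ((((c0 :: rest).take rest.length).length : Nat) : Int) 1).foldl
        (fun st j => pvStepA st (PySem.List.pyGetD ((c0 :: rest).take rest.length) j ' ')) st0 := by
    apply PySem.List.foldl_congr_mem
    intro st i hi
    have hi' := (PySem.List.mem_pyRange_one).1 hi
    rw [hxslen] at hi'
    show pvStepA st (PySem.List.pyGetD (c0 :: rest) i ' ') = _
    obtain ⟨hi1, hi2⟩ := hi'
    rw [show i = ((i.toNat : Nat) : Int) by omega, PySem.List.pyGetD_natCast,
      PySem.List.pyGetD_natCast]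
    congr 1
    rw [List.getD_eq_getElem?_getD, List.getD_eq_getElem?_getD, List.getElem?_take,
      if_pos (by omega)]
  rw [hcongr, PySem.List.foldl_pyRange_pyGetD' ((c0 :: rest).take rest.length) ' ' pvStepA st0
    (by omega : (0 : Int) ≤ 1)]
  congr 1
  simp [List.drop_take, List.dropLast_eq_take]

-- B's slice s[1:n-1] is the same middle character list
theorem kodB_slice (c0 : Char) (rest : List Char) :
    PySem.List.slice (c0 :: rest) (some 1) (some (((c0 :: rest).length : Int) - 1))
      = rest.dropLast := by
  have hb : (((c0 :: rest).length : Int) - 1) = ((rest.length : Nat) : Int) := by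
    push_cast [List.length_cons]; ring
  rw [hb, show (1 : Int) = ((1 : Nat) : Int) from rfl, PySem.List.slice_natCast]
  simp [List.dropLast_eq_take]

-- ===== VERDICT (by name: the statement is the Claim_ definition above) =====
theorem kod_spec : Claim_equal_kod := by
  intro s _ hpre
  unfold Spec_kod
  rcases hcs : s.toList with _ | ⟨c0, rest⟩
  · exact absurd hcs hpre
  · simp only [kod, kod_alt, hcs]
    rw [kodA_fold, kodB_slice, buildRuns_eq]
    have hmain := pvMain rest.dropLast [c0] (pvIsVowel c0) 0 0 [] [] rfl (by omega)
      (fun _ => rfl) (fun _ _ _ => rfl)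
    rw [pvIsVowel_eq] at hmain
    rw [hmain]
    simp only [pvIsVowel_eq]
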